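-- pv_equiv track=rewrite | github.com/mxx1219/bug_fixing_agent_empirical_study | symbol_level_fl/get_exp_line_info.py | get_hunks
-- ===== SOURCE A (Python) =====
-- def get_hunks(deleted_lines, added_lines):
--     """
--     Group consecutive deleted line numbers into hunks, while removing overlapping added lines.
--
--     Args:
--         deleted_lines: List[int] - Sorted list of deleted line numbers
--         added_lines: List[int] - List of added line numbers (will be modified during processing)
--
--     Returns:
--         List[List[int]] - List of hunks where each hunk contains consecutive line numbers
--     """
--     hunks = []
--     current_hunk = []
--     for factor in deleted_lines:
--         if current_hunk and factor != max(current_hunk) + 1: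
--             hunks.append(current_hunk[:])
--             current_hunk = []
--
--         # Remove adjacent added lines that might overlap
--         if factor-1 in added_lines:
--             added_lines.remove(factor-1)
--         if factor in added_lines:
--             added_lines.remove(factor)
--
--         current_hunk.append(factor)
--
--     if current_hunk:
--         hunks.append(current_hunk[:])
--     return hunks
-- ===== SOURCE B (Python) =====
-- def get_hunks(deleted_lines, added_lines):
--     # Prune overlapping added lines first (same in-place first-occurrence removal).
--     for factor in deleted_lines:
--         if factor - 1 in added_lines:
--             added_lines.remove(factor - 1)
--         if factor in added_lines:
--             added_lines.remove(factor)
--     # Build hunks back-to-front: walk the list reversed and prepend each value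
--     # to the front hunk when it extends it downward, else open a new front hunk.
--     hunks = []
--     for x in reversed(deleted_lines):
--         if hunks and hunks[0][0] == x + 1:
--             hunks[0].insert(0, x)
--         else:
--             hunks.insert(0, [x])
--     return hunks
-- ===== Notes on version B (the rewrite author's own statement) =====
-- stated objective: alternative
-- what changed: Loop fission: the added_lines pruning stays as its own first pass, and the hunks are then built in a separate back-to-front pass that prepends each value to the front hunk when it extends it, replacing A's forward accumulator that recomputes max(current_hunk) at every step.
import Mathlib
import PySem

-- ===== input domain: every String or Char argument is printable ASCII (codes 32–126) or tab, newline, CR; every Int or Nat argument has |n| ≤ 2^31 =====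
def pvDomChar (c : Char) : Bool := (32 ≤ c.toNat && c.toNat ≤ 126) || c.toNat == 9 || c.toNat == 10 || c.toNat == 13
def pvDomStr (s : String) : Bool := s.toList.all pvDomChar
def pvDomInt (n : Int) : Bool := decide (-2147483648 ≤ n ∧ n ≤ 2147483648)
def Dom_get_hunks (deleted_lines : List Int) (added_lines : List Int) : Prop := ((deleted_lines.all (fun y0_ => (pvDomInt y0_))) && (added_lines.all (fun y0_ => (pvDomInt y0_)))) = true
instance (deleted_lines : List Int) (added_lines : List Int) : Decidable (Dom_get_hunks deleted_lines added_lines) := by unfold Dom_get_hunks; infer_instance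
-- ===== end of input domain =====

-- B builds the hunks in a separate back-to-front pass (prepend to the front hunk) instead of
-- A's forward accumulator with max(); same return value, same in-place pruning of added_lines
-- (the equivalence proved here is about the return value; B performs the same mutation).

-- ===== PORT A =====
-- `if factor-1 in added_lines: added_lines.remove(factor-1); if factor in added_lines: added_lines.remove(factor)`
def pvPruneStepA (added : List Int) (factor : Int) : List Int :=
  let added := if (factor - 1) ∈ added then (PySem.List.remove? added (factor - 1)).getD added else added
  if factor ∈ added then (PySem.List.remove? added factor).getD added else added

-- the `for factor in deleted_lines` loop of A, state = (hunks, current_hunk, added_lines)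
def pvLoopA (dl : List Int) (hunks : List (List Int)) (cur : List Int) (added : List Int) :
    List (List Int) :=
  match dl with
  | [] => if cur ≠ [] then hunks ++ [cur] else hunks
  | factor :: rest =>
    let p : List (List Int) × List Int :=
      if cur ≠ [] ∧ factor ≠ ((PySem.List.max? cur (fun y => y)).getD 0) + 1
      then (hunks ++ [cur], ([] : List Int)) else (hunks, cur)
    pvLoopA rest p.1 (p.2 ++ [factor]) (pvPruneStepA added factor)

def get_hunks (deleted_lines : List Int) (added_lines : List Int) : List (List Int) :=
  pvLoopA deleted_lines [] [] added_lines

-- ===== PORT B =====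
-- B's pruning loop (identical in the Python source to A's first two ifs)
def pvPruneB (added : List Int) (factor : Int) : List Int :=
  let a1 := if (factor - 1) ∈ added then (PySem.List.remove? added (factor - 1)).getD added else added
  if factor ∈ a1 then (PySem.List.remove? a1 factor).getD a1 else a1

-- `for x in reversed(deleted_lines): prepend x to the front hunk or open a new one`
-- (iteration over the reversed list = structural recursion from the right)
def pvGroupB : List Int → List (List Int)
  | [] => []
  | x :: xs =>
    match pvGroupB xs with
    | [] => [[x]]
    | g :: gs => if g.head? = some (x + 1) then (x :: g) :: gs else [x] :: g :: gs

def get_hunks_alt (deleted_lines : List Int) (added_lines : List Int) : List (List Int) :=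
  let _pruned := deleted_lines.foldl pvPruneB added_lines
  pvGroupB deleted_lines

-- ===== PRECONDITION & SPEC =====
def Spec_get_hunks (deleted_lines : List Int) (added_lines : List Int) (out : List (List Int)) : Prop := out = get_hunks_alt deleted_lines added_lines
instance (deleted_lines : List Int) (added_lines : List Int) (out : List (List Int)) : Decidable (Spec_get_hunks deleted_lines added_lines out) := by unfold Spec_get_hunks; infer_instance

-- ===== CLAIM (what is proved, stated in full; the proofs are below) =====
def Claim_equal_get_hunks : Prop := ∀ (deleted_lines : List Int) (added_lines : List Int), Dom_get_hunks deleted_lines added_lines → Spec_get_hunks deleted_lines added_lines (get_hunks deleted_lines added_lines)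

-- ===== LEMMAS AND PROOFS =====

-- "attach the open run `cur` (whose maximum is `b`) in front of the already-built groups"
def pvGlue (cur : List Int) (b : Int) (gs : List (List Int)) : List (List Int) :=
  match gs with
  | [] => [cur]
  | g :: gs' => if g.head? = some (b + 1) then (cur ++ g) :: gs' else cur :: g :: gs'

theorem pvGroupB_cons (f : Int) (rest : List Int) :
    pvGroupB (f :: rest) = pvGlue [f] f (pvGroupB rest) := by
  cases h : pvGroupB rest with
  | nil => simp [pvGroupB, pvGlue, h]
  | cons g gs => simp [pvGroupB, pvGlue, h]

theorem pvGlue_glue_eq (cur : List Int) (b : Int) (gs : List (List Int)) :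
    pvGlue cur b (pvGlue [b + 1] (b + 1) gs) = pvGlue (cur ++ [b + 1]) (b + 1) gs := by
  cases gs with
  | nil => simp [pvGlue]
  | cons g gs' =>
    by_cases h : g.head? = some (b + 1 + 1)
    · simp [pvGlue, h]
    · simp [pvGlue, h]

theorem pvGlue_glue_ne (cur : List Int) (b f : Int) (hf : f ≠ b + 1) (gs : List (List Int)) :
    pvGlue cur b (pvGlue [f] f gs) = cur :: pvGlue [f] f gs := by
  cases gs with
  | nil => simp [pvGlue, hf]
  | cons g gs' =>
    by_cases h : g.head? = some (f + 1)
    · simp [pvGlue, h, hf]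
    · simp [pvGlue, h, hf]

theorem pvLoopA_run (dl : List Int) :
    ∀ (hunks : List (List Int)) (c : Int) (t : List Int) (b : Int) (added : List Int),
      t.foldl max c = b →
      pvLoopA dl hunks (c :: t) added = hunks ++ pvGlue (c :: t) b (pvGroupB dl) := by
  induction dl with
  | nil => intro hunks c t b added hb; simp [pvLoopA, pvGlue, pvGroupB]
  | cons f rest ih =>
    intro hunks c t b added hb
    have hmax : (PySem.List.max? (c :: t) (fun y => y)).getD 0 = b := by
      rw [PySem.List.max?_id_cons]; simp [hb]
    by_cases hf : f = b + 1
    · have hcond : ¬ ((c :: t) ≠ [] ∧ f ≠ ((PySem.List.max? (c :: t) (fun y => y)).getD 0) + 1) := by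
        simp [hmax, hf]
      have hstep : pvLoopA (f :: rest) hunks (c :: t) added
          = pvLoopA rest hunks (c :: (t ++ [f])) (pvPruneStepA added f) := by
        simp [pvLoopA, hmax, hf]
      rw [hstep, ih hunks c (t ++ [f]) f (pvPruneStepA added f)
          (by rw [List.foldl_append, hb]; show max b f = f; rw [hf]; exact max_eq_right (by omega))]
      rw [pvGroupB_cons, hf, pvGlue_glue_eq]
      simp
    · have hcond : ((c :: t) ≠ [] ∧ f ≠ ((PySem.List.max? (c :: t) (fun y => y)).getD 0) + 1) := by
        simp [hmax, hf]
      have hstep : pvLoopA (f :: rest) hunks (c :: t) added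
          = pvLoopA rest (hunks ++ [c :: t]) [f] (pvPruneStepA added f) := by
        simp [pvLoopA, hmax, hf]
      rw [hstep, ih (hunks ++ [c :: t]) f [] f (pvPruneStepA added f) (by simp)]
      rw [pvGroupB_cons, pvGlue_glue_ne _ _ _ hf]
      simp

theorem get_hunks_eq_groupB (dl al : List Int) : get_hunks dl al = pvGroupB dl := by
  cases dl with
  | nil => simp [get_hunks, pvLoopA, pvGroupB]
  | cons f rest =>
    have hstep : get_hunks (f :: rest) al
        = pvLoopA rest [] [f] (pvPruneStepA al f) := by
      simp [get_hunks, pvLoopA]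
    rw [hstep, pvLoopA_run rest [] f [] f (pvPruneStepA al f) (by simp)]
    rw [pvGroupB_cons]
    simp

-- ===== VERDICT (by name: the statement is the Claim_ definition above) =====
theorem get_hunks_spec : Claim_equal_get_hunks := by
  intro dl al _
  unfold Spec_get_hunks get_hunks_alt
  exact get_hunks_eq_groupB dl al
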